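-- pv_equiv track=rewrite | github.com/theduardomaciel/cc-paa | section6/5.py | greedy_vertex_coloring
-- ===== SOURCE A (Python) =====
-- def greedy_vertex_coloring(graph):
--     color = {}
--     for vertex in sorted(
--         graph, key=lambda x: len(graph[x]), reverse=True
--     ):  # ordena por grau
--         neighbor_colors = {
--             color[neighbor] for neighbor in graph[vertex] if neighbor in color
--         }
--         for c in range(len(graph) + 1):
--             if c not in neighbor_colors:
--                 color[vertex] = c
--                 break
--     return color
-- ===== SOURCE B (Python) =====
-- def greedy_vertex_coloring(graph):
--     color = {}
--     for vertex in sorted(graph, key=lambda v: len(graph[v]), reverse=True):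
--         used = sorted(color[n] for n in graph[vertex] if n in color)
--         expected = 0
--         for c in used:
--             if c == expected:
--                 expected += 1
--         color[vertex] = expected
--     return color
-- ===== Notes on version B (the rewrite author's own statement) =====
-- stated objective: alternative
-- what changed: The smallest free color is computed by sorting the already-colored neighbors' colors and scanning that sorted list once with a counter, instead of probing a set of neighbor colors for each candidate in range(len(graph)+1).
import Mathlib
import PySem

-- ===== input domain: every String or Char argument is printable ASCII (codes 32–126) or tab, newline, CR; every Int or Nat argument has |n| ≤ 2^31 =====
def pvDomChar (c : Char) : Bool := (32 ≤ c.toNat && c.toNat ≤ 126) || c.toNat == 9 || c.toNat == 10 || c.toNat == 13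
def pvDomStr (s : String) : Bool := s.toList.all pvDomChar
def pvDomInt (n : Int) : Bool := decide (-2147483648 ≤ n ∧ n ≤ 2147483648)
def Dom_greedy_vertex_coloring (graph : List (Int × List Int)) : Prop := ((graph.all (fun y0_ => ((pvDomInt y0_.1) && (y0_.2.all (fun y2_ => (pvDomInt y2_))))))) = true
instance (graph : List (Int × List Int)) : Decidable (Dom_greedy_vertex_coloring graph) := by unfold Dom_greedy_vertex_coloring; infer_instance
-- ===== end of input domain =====

-- B replaces A's smallest-free-color search (membership probes over range(len(graph)+1)
-- against a set of neighbor colors) with a sort-then-single-pass mex over the neighbors'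
-- colors; same greedy-by-descending-degree strategy, same output (objective: alternative).

-- ===== PORT A =====
-- the set comprehension {color[neighbor] for neighbor in graph[vertex] if neighbor in color}
def gvcNeighborColors (color : PySem.Dict Int Int) (nbrs : List Int) : PySem.Set Int :=
  nbrs.foldl (fun s n => match color.get? n with
    | some c => PySem.Set.add s c
    | none => s) PySem.Set.empty

-- one iteration of A's outer loop: for c in range(len(graph)+1): if c not in neighbor_colors: color[vertex] = c; break
def gvcStepA (d : PySem.Dict Int (List Int)) (color : PySem.Dict Int Int) (vertex : Int) :
    PySem.Dict Int Int :=
  match (PySem.List.pyRange 0 ((d.size : Int) + 1) 1).find?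
          (fun c => !(PySem.Set.contains (gvcNeighborColors color (d.getD vertex [])) c)) with
  | some c => color.insert vertex c
  | none => color

def greedy_vertex_coloring (graph : List (Int × List Int)) : List (Int × Int) :=
  let d := PySem.Dict.ofList graph
  ((PySem.List.sorted d.keys (fun x => ((d.getD x []).length : Int)) true).foldl
      (gvcStepA d) PySem.Dict.empty).items

-- ===== PORT B =====
-- one iteration of B's loop: sort the colored neighbors' colors, scan once for the mex, assign it
def gvcStepB (d : PySem.Dict Int (List Int)) (color : PySem.Dict Int Int) (vertex : Int) :
    PySem.Dict Int Int :=
  color.insert vertex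
    ((PySem.List.sorted ((d.getD vertex []).filterMap (fun n => color.get? n)) (fun c => c) false).foldl
      (fun e c => if c = e then e + 1 else e) (0 : Int))

def greedy_vertex_coloring_alt (graph : List (Int × List Int)) : List (Int × Int) :=
  let d := PySem.Dict.ofList graph
  ((PySem.List.sorted d.keys (fun v => ((d.getD v []).length : Int)) true).foldl
      (gvcStepB d) PySem.Dict.empty).items

-- ===== PRECONDITION & SPEC =====
def Spec_greedy_vertex_coloring (graph : List (Int × List Int)) (out : List (Int × Int)) : Prop := out = greedy_vertex_coloring_alt graph
instance (graph : List (Int × List Int)) (out : List (Int × Int)) : Decidable (Spec_greedy_vertex_coloring graph out) := by unfold Spec_greedy_vertex_coloring; infer_instance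

-- ===== CLAIM (what is proved, stated in full; the proofs are below) =====
def Claim_equal_greedy_vertex_coloring : Prop := ∀ (graph : List (Int × List Int)), Dom_greedy_vertex_coloring graph → Spec_greedy_vertex_coloring graph (greedy_vertex_coloring graph)

-- ===== LEMMAS AND PROOFS =====

-- a Nodup list contained in another list is no longer than it
theorem gvc_nodup_subset_length {xs ys : List Int} (h : xs.Nodup)
    (hsub : ∀ x ∈ xs, x ∈ ys) : xs.length ≤ ys.length := by
  calc xs.length = xs.toFinset.card := (List.toFinset_card_of_nodup h).symm
    _ ≤ ys.toFinset.card := by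
        apply Finset.card_le_card
        intro x hx
        simp only [List.mem_toFinset] at *
        exact hsub x hx
    _ ≤ ys.length := ys.toFinset_card_le

-- membership in A's comprehension set, accumulator generalized
theorem gvc_mem_aux (color : PySem.Dict Int Int) (nbrs : List Int) (s : PySem.Set Int) (c : Int) :
    c ∈ nbrs.foldl (fun s n => match color.get? n with
      | some c => PySem.Set.add s c
      | none => s) s ↔ c ∈ s ∨ c ∈ nbrs.filterMap (fun n => color.get? n) := by
  induction nbrs generalizing s with
  | nil => simp
  | cons n t ih =>
    simp only [List.foldl_cons, List.filterMap_cons]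
    cases h : color.get? n with
    | none => simp [ih]
    | some v =>
      simp only [ih, PySem.Set.mem_add, List.mem_cons]
      tauto

theorem gvc_nodup_aux (color : PySem.Dict Int Int) (nbrs : List Int) (s : PySem.Set Int)
    (h : s.Nodup) :
    (nbrs.foldl (fun s n => match color.get? n with
      | some c => PySem.Set.add s c
      | none => s) s).Nodup := by
  induction nbrs generalizing s with
  | nil => exact h
  | cons n t ih =>
    cases hg : color.get? n with
    | none => simpa [hg] using ih s h
    | some v => simpa [hg] using ih _ (PySem.Set.nodup_add s v h)

-- every collected color is a value of the color dict
theorem gvc_sub_aux (color : PySem.Dict Int Int) (nbrs : List Int) (s : PySem.Set Int)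
    (h : ∀ c ∈ s, c ∈ color.values) :
    ∀ c ∈ nbrs.foldl (fun s n => match color.get? n with
      | some c => PySem.Set.add s c
      | none => s) s, c ∈ color.values := by
  induction nbrs generalizing s with
  | nil => exact h
  | cons n t ih =>
    cases hg : color.get? n with
    | none => simpa [hg] using ih s h
    | some v =>
      simp only [List.foldl_cons, hg]
      refine ih _ ?_
      intro c hc
      rcases (PySem.Set.mem_add _ _ _).mp hc with h1 | h1
      · exact h c h1
      · subst h1
        have := PySem.Dict.mem_items_of_get?_eq_some color hg
        simp only [PySem.Dict.values]
        exact List.mem_map.mpr ⟨(n, c), this, rfl⟩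

-- B's scan over an ascending list computes the least value ≥ start not in the list
theorem gvc_scan_mex (l : List Int) (hp : l.Pairwise (· ≤ ·)) (a : Int) :
    a ≤ l.foldl (fun e c => if c = e then e + 1 else e) a ∧
    (∀ k, a ≤ k → k < l.foldl (fun e c => if c = e then e + 1 else e) a → k ∈ l) ∧
    l.foldl (fun e c => if c = e then e + 1 else e) a ∉ l := by
  induction l generalizing a with
  | nil => simp
  | cons c t ih =>
    obtain ⟨hct, hpt⟩ := List.pairwise_cons.mp hp
    by_cases hca : c = a
    · subst hca
      rw [List.foldl_cons, if_pos rfl]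
      obtain ⟨h1, h2, h3⟩ := ih hpt (c + 1)
      refine ⟨by omega, ?_, ?_⟩
      · intro k hk1 hk2
        rcases eq_or_lt_of_le hk1 with h | h
        · exact h ▸ List.mem_cons_self
        · exact List.mem_cons_of_mem _ (h2 k (by omega) hk2)
      · intro hmem
        rcases List.mem_cons.mp hmem with h | h
        · omega
        · exact h3 h
    · rw [List.foldl_cons, if_neg hca]
      obtain ⟨h1, h2, h3⟩ := ih hpt a
      refine ⟨h1, ?_, ?_⟩
      · intro k hk1 hk2
        exact List.mem_cons_of_mem _ (h2 k hk1 hk2)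
      · intro hmem
        rcases List.mem_cons.mp hmem with h | h
        · rcases eq_or_lt_of_le h1 with he | he
          · exact hca (by omega)
          · have := hct a (h2 a le_rfl he)
            omega
        · exact h3 h

-- A's find? over range(a, M) returns the least m ≥ a satisfying p, if m < M
theorem gvc_find_range (p : Int → Bool) (M m : Int) (n : ℕ) : ∀ (a : Int), (m - a).toNat = n →
    a ≤ m → m < M →
    (∀ k, a ≤ k → k < m → p k = false) → p m = true →
    (PySem.List.pyRange a M 1).find? p = some m := by
  induction n with
  | zero =>
    intro a hn ha hM hfalse htrue
    have : a = m := by omega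
    subst this
    rw [PySem.List.pyRange_one_cons (by omega)]
    simp [htrue]
  | succ n ih =>
    intro a hn ha hM hfalse htrue
    have ham : a < m := by omega
    rw [PySem.List.pyRange_one_cons (by omega)]
    rw [List.find?_cons_of_neg (by simp [hfalse a le_rfl ham])]
    exact ih (a + 1) (by omega) (by omega) hM (fun k h1 h2 => hfalse k (by omega) h2) htrue

-- the two loop bodies agree whenever the color dict keys are distinct keys of the graph
theorem gvc_step_eq (d : PySem.Dict Int (List Int)) (color : PySem.Dict Int Int) (v : Int)
    (hnd : color.keys.Nodup) (hsub : ∀ k ∈ color.keys, k ∈ d.keys) :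
    gvcStepA d color v = gvcStepB d color v := by
  unfold gvcStepA gvcStepB
  set nbrs := d.getD v [] with hnbrs
  set used := PySem.List.sorted (nbrs.filterMap (fun n => color.get? n)) (fun c => c) false
    with hused
  set m := used.foldl (fun e c => if c = e then e + 1 else e) (0 : Int) with hm
  set S := gvcNeighborColors color nbrs with hS
  have hpair : used.Pairwise (· ≤ ·) :=
    PySem.List.sorted_pairwise (nbrs.filterMap (fun n => color.get? n)) (fun c => c)
  obtain ⟨h0m, hlt, hnotin⟩ := gvc_scan_mex used hpair 0
  have hmemS : ∀ c : Int, c ∈ S ↔ c ∈ used := by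
    intro c
    rw [hused, PySem.List.mem_sorted, hS]
    unfold gvcNeighborColors
    rw [gvc_mem_aux]
    simp [PySem.Set.empty]
  have hSnodup : S.Nodup := gvc_nodup_aux color nbrs PySem.Set.empty (by simp [PySem.Set.empty])
  -- the mex is at most the number of already colored vertices, hence ≤ d.size
  have hbound : m < (d.size : Int) + 1 := by
    have hinj : (PySem.List.pyRange 0 m 1).Nodup := PySem.List.nodup_pyRange_one 0 m
    have hsubS : ∀ x ∈ PySem.List.pyRange 0 m 1, x ∈ S := by
      intro x hx
      have hx' := (PySem.List.mem_pyRange_one).mp hx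
      exact (hmemS _).mpr (hlt x hx'.1 hx'.2)
    have h1 : m.toNat ≤ S.length := by
      have := gvc_nodup_subset_length hinj hsubS
      simpa [PySem.List.length_pyRange_one] using this
    have h2 : S.length ≤ color.values.length :=
      gvc_nodup_subset_length hSnodup
        (gvc_sub_aux color nbrs PySem.Set.empty (by simp [PySem.Set.empty]))
    have h3 : color.values.length = color.keys.length := by
      simp [PySem.Dict.values, PySem.Dict.keys]
    have h4 : color.keys.length ≤ d.keys.length := gvc_nodup_subset_length hnd hsub
    have h5 : d.keys.length = d.size := by simp [PySem.Dict.keys, PySem.Dict.size]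
    omega
  have hfind : (PySem.List.pyRange 0 ((d.size : Int) + 1) 1).find?
      (fun c => !(PySem.Set.contains S c)) = some m := by
    apply gvc_find_range _ _ m (m - 0).toNat 0 rfl h0m hbound
    · intro k hk1 hk2
      simpa using (hmemS k).mpr (hlt k hk1 hk2)
    · simpa using fun h => hnotin ((hmemS m).mp h)
  rw [hfind]

-- the whole loop: fold both bodies from the same start over vertices of the graph
theorem gvc_fold_eq (d : PySem.Dict Int (List Int)) (l : List Int) :
    ∀ (color : PySem.Dict Int Int), color.keys.Nodup → (∀ k ∈ color.keys, k ∈ d.keys) →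
    (∀ x ∈ l, x ∈ d.keys) →
    l.foldl (gvcStepA d) color = l.foldl (gvcStepB d) color := by
  induction l with
  | nil => intro _ _ _ _; rfl
  | cons v t ih =>
    intro color hnd hsub hl
    rw [List.foldl_cons, List.foldl_cons, gvc_step_eq d color v hnd hsub]
    unfold gvcStepB
    refine ih _ (PySem.Dict.nodup_keys_insert _ _ _ hnd) ?_ (fun x hx => hl x (List.mem_cons_of_mem _ hx))
    intro k hk
    rcases (PySem.Dict.mem_keys_insert _ _ _ _).mp hk with h | h
    · exact h ▸ hl v List.mem_cons_self
    · exact hsub k h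

-- ===== VERDICT (by name: the statement is the Claim_ definition above) =====
theorem greedy_vertex_coloring_spec : Claim_equal_greedy_vertex_coloring := by
  intro graph _
  unfold Spec_greedy_vertex_coloring greedy_vertex_coloring greedy_vertex_coloring_alt
  apply congrArg PySem.Dict.items
  apply gvc_fold_eq
  · simp [PySem.Dict.empty]
  · simp [PySem.Dict.empty]
  · intro x hx
    exact (PySem.List.mem_sorted _ _ _ _).mp hx
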